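-- pv_equiv track=rewrite | github.com/daniel-reich/ubiquitous-fiesta | 6NoaFGKJgRW6oXhLC_6.py | sum_of_vowels
-- ===== SOURCE A (Python) =====
-- def sum_of_vowels(sentence):
--     sentence = sentence.lower()
--     count = 0
--
--     for ltr in sentence:
--       if ltr == 'a':
--         count += 4
--       elif ltr == 'e':
--         count += 3
--       elif ltr == 'i':
--         count += 1
--
--     return count
-- ===== SOURCE B (Python) =====
-- def sum_of_vowels(sentence):
--     sentence = sentence.lower()
--     return 4 * sentence.count('a') + 3 * sentence.count('e') + sentence.count('i')
-- ===== Notes on version B (the rewrite author's own statement) =====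
-- stated objective: faster
-- what changed: Replaces the single branching per-character Python-level loop with a closed arithmetic combination of three independent str.count scans (C-level), one per weighted vowel.
import Mathlib
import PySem

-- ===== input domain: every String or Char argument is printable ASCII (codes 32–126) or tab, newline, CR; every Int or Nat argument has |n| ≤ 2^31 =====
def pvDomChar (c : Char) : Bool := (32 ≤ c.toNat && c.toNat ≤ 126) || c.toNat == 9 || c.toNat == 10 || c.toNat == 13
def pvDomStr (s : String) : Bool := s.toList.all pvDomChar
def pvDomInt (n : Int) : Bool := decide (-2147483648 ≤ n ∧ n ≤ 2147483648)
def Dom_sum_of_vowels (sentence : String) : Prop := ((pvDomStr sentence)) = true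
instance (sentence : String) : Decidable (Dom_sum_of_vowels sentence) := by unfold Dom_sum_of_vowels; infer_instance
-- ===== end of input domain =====

-- B replaces A's single branching character loop by a closed arithmetic combination of
-- three independent per-vowel count scans (objective: faster by a constant factor — C-level str.count scans replace the Python-level loop, measured).

-- ===== PORT A =====
def sum_of_vowels (sentence : String) : Int :=
  let sentence := PySem.Str.lower sentence
  sentence.toList.foldl
    (fun count ltr =>
      if ltr == 'a' then count + 4
      else if ltr == 'e' then count + 3
      else if ltr == 'i' then count + 1
      else count) 0

-- ===== PORT B =====
def sum_of_vowels_alt (sentence : String) : Int :=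
  let s := PySem.Str.lower sentence
  4 * (PySem.Str.count s "a" : Int) + 3 * (PySem.Str.count s "e" : Int)
    + (PySem.Str.count s "i" : Int)

-- ===== PRECONDITION & SPEC =====
def Spec_sum_of_vowels (sentence : String) (out : Int) : Prop := out = sum_of_vowels_alt sentence
instance (sentence : String) (out : Int) : Decidable (Spec_sum_of_vowels sentence out) := by unfold Spec_sum_of_vowels; infer_instance

-- ===== CLAIM (what is proved, stated in full; the proofs are below) =====
def Claim_equal_sum_of_vowels : Prop := ∀ (sentence : String), Dom_sum_of_vowels sentence → Spec_sum_of_vowels sentence (sum_of_vowels sentence)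

-- ===== LEMMAS AND PROOFS =====

-- Python-count with a one-character needle is plain character counting.
theorem pvGoSingle (c : Char) : ∀ (fuel : Nat) (l : List Char) (acc : Nat), l.length ≤ fuel →
    PySem.Chars.count.go [c] fuel l acc = acc + l.count c := by
  intro fuel
  induction fuel with
  | zero =>
    intro l acc h
    cases l with
    | nil => simp [PySem.Chars.count.go]
    | cons x t => simp at h
  | succ n ih =>
    intro l acc h
    cases l with
    | nil => simp [PySem.Chars.count.go]
    | cons x t =>
      simp only [PySem.Chars.count.go, List.isPrefixOf, List.count_cons]
      by_cases hx : x = c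
      · simp [hx, ih t _ (by simpa using h)]
        omega
      · simp [hx, ih t _ (by simpa using h), Ne.symm hx]

theorem pvCountSingle (l : List Char) (c : Char) : PySem.Chars.count l [c] = l.count c := by
  simpa [PySem.Chars.count] using pvGoSingle c l.length l 0 le_rfl

-- A's loop computes the weighted sum of the three per-vowel counts.
theorem pvFoldlWeighted (l : List Char) (a : Int) :
    l.foldl (fun count ltr =>
      if ltr == 'a' then count + 4
      else if ltr == 'e' then count + 3
      else if ltr == 'i' then count + 1
      else count) a
    = a + 4 * (l.count 'a' : Int) + 3 * (l.count 'e' : Int) + (l.count 'i' : Int) := by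
  induction l generalizing a with
  | nil => simp
  | cons x t ih =>
    simp only [List.foldl_cons, List.count_cons, ih]
    by_cases h1 : x = 'a' <;> by_cases h2 : x = 'e' <;> by_cases h3 : x = 'i' <;>
      simp_all <;> ring

-- ===== VERDICT (by name: the statement is the Claim_ definition above) =====
theorem sum_of_vowels_spec : Claim_equal_sum_of_vowels := by
  intro sentence _
  unfold Spec_sum_of_vowels sum_of_vowels sum_of_vowels_alt
  simp only [PySem.Str.count_eq, show "a".toList = ['a'] from rfl,
    show "e".toList = ['e'] from rfl, show "i".toList = ['i'] from rfl,
    pvCountSingle, pvFoldlWeighted]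
  ring
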